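-- pv_equiv track=rewrite | github.com/tatsujin-craft/atcoder_algorithm | abc393/scripts/c.py | find_remove_edges
-- ===== SOURCE A (Python) =====
-- def find_remove_edges(edges):
--     freq = {}
--     loops = 0
--     for u, v in edges:
--         if u == v:
--             loops += 1
--         else:
--             if u > v:
--                 u, v = v, u
--             if (u, v) not in freq:
--                 freq[(u, v)] = 0
--             freq[(u, v)] += 1
--
--     remove_edges = loops
--     for c in freq.values():
--         remove_edges += c - 1
--
--     return remove_edges
-- ===== SOURCE B (Python) =====
-- def find_remove_edges(edges):
--     keys = sorted((u, v) if u <= v else (v, u) for u, v in edges if u != v)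
--     distinct = 0
--     prev = None
--     for k in keys:
--         if k != prev:
--             distinct += 1
--             prev = k
--     return len(edges) - distinct
-- ===== Notes on version B (the rewrite author's own statement) =====
-- stated objective: alternative
-- what changed: Replaces A's hash-counting (a dict of per-key multiplicities plus a second loop summing count-1) by a sort-based scheme: normalize the non-loop edges, sort them, count the distinct keys by comparing adjacent elements, and return len(edges) minus that count.
import Mathlib
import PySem

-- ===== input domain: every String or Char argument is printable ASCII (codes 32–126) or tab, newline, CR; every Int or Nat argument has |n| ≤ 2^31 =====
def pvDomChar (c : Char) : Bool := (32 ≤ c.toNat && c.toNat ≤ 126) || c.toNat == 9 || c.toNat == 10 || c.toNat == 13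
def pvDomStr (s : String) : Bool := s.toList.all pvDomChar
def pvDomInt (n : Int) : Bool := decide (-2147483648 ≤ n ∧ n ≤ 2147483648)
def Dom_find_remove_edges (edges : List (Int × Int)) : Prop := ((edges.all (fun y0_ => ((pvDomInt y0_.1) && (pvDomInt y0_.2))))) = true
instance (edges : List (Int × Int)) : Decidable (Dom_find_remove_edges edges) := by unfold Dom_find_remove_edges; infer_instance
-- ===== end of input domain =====

-- B replaces A's hash-counting (dict of multiplicities + a summing loop) by a
-- sort-based scheme: sort the normalized non-loop edges and count distinct keys
-- by adjacent comparison; result = len(edges) - distinct (objective: alternative).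

-- ===== PORT A =====
-- the loop body of A: update (freq, loops) by one edge
def pvStepA (st : PySem.Dict (Int × Int) Int × Int) (e : Int × Int) :
    PySem.Dict (Int × Int) Int × Int :=
  let freq := st.1
  let loops := st.2
  let u := e.1
  let v := e.2
  if u = v then
    (freq, loops + 1)
  else
    let uv := if u > v then (v, u) else (u, v)
    let freq := if ¬ (freq.contains uv) then freq.insert uv 0 else freq
    let freq := freq.insert uv (freq.getD uv 0 + 1)
    (freq, loops)

def find_remove_edges (edges : List (Int × Int)) : Int :=
  let st := edges.foldl pvStepA (PySem.Dict.empty, 0)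
  let freq := st.1
  let loops := st.2
  (freq.values).foldl (fun acc c => acc + (c - 1)) loops

-- ===== PORT B =====
-- the scan body of B: 'if k != prev: distinct += 1; prev = k'
def pvStepB (st : Int × Option (Int × Int)) (k : Int × Int) : Int × Option (Int × Int) :=
  if some k ≠ st.2 then (st.1 + 1, some k) else st

def find_remove_edges_alt (edges : List (Int × Int)) : Int :=
  let keys := PySem.List.sorted2
    ((edges.filter (fun e => !(e.1 == e.2))).map (fun e => if e.1 ≤ e.2 then e else (e.2, e.1)))
    (·.1) (·.2)
  let st := keys.foldl pvStepB (0, none)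
  (edges.length : Int) - st.1

-- ===== PRECONDITION & SPEC =====
def Spec_find_remove_edges (edges : List (Int × Int)) (out : Int) : Prop := out = find_remove_edges_alt edges
instance (edges : List (Int × Int)) (out : Int) : Decidable (Spec_find_remove_edges edges out) := by unfold Spec_find_remove_edges; infer_instance

-- ===== CLAIM (what is proved, stated in full; the proofs are below) =====
def Claim_equal_find_remove_edges : Prop := ∀ (edges : List (Int × Int)), Dom_find_remove_edges edges → Spec_find_remove_edges edges (find_remove_edges edges)

-- ===== LEMMAS AND PROOFS =====

-- the set of normalized non-loop keys of a list of edges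
def pvK (l : List (Int × Int)) : Finset (Int × Int) :=
  ((l.filter (fun e => e.1 ≠ e.2)).map (fun e => (min e.1 e.2, max e.1 e.2))).toFinset

-- lexicographic ≤ on pairs (Python's tuple order)
def pvLexLe (a b : Int × Int) : Prop := a.1 < b.1 ∨ (a.1 = b.1 ∧ a.2 ≤ b.2)

-- the boolean strict comparison sorted2 uses (with keys ·.1, ·.2)
def pvBLt (a b : Int × Int) : Bool :=
  decide (a.1 < b.1) || (!(decide (b.1 < a.1)) && decide (a.2 < b.2))

lemma pvLexLe_of_bLt_true {a b : Int × Int} (h : pvBLt a b = true) : pvLexLe a b := by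
  simp [pvBLt] at h; unfold pvLexLe; omega

lemma pvLexLe_of_bLt_false {a b : Int × Int} (h : pvBLt a b = false) : pvLexLe b a := by
  simp [pvBLt] at h; unfold pvLexLe; omega

lemma pvLexLe_trans {a b c : Int × Int} (h1 : pvLexLe a b) (h2 : pvLexLe b c) : pvLexLe a c := by
  unfold pvLexLe at *; omega

lemma pvLexLe_ne_of_ne {p k x : Int × Int} (h1 : pvLexLe p k) (h2 : p ≠ k) (h3 : pvLexLe k x) :
    p ≠ x := by
  unfold pvLexLe at *
  intro he; subst he
  apply h2
  have : p.1 = k.1 ∧ p.2 = k.2 := by omega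
  exact Prod.ext this.1 this.2

lemma insertBy_cons (before : (Int × Int) → (Int × Int) → Bool) (x y : Int × Int)
    (ys : List (Int × Int)) :
    PySem.List.insertBy before x (y :: ys)
      = if before x y then x :: y :: ys else y :: PySem.List.insertBy before x ys := rfl

lemma insertBy_pairwise (x : Int × Int) (acc : List (Int × Int))
    (h : acc.Pairwise pvLexLe) :
    (PySem.List.insertBy pvBLt x acc).Pairwise pvLexLe := by
  induction acc with
  | nil => simp [PySem.List.insertBy]
  | cons y ys ih =>
      rw [List.pairwise_cons] at h
      rw [insertBy_cons]
      by_cases hb : pvBLt x y = true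
      · rw [if_pos hb]
        refine List.Pairwise.cons ?_ (List.Pairwise.cons h.1 h.2)
        intro z hz
        rcases List.mem_cons.mp hz with hzy | hzys
        · subst hzy; exact pvLexLe_of_bLt_true hb
        · exact pvLexLe_trans (pvLexLe_of_bLt_true hb) (h.1 z hzys)
      · rw [if_neg hb]
        refine List.Pairwise.cons ?_ (ih h.2)
        intro z hz
        rcases (PySem.List.mem_insertBy pvBLt x z ys).mp hz with hzx | hzys
        · subst hzx; exact pvLexLe_of_bLt_false (by simpa using hb)
        · exact h.1 z hzys

lemma foldl_insertBy_pairwise (l : List (Int × Int)) :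
    ∀ acc : List (Int × Int), acc.Pairwise pvLexLe →
    (l.foldl (fun acc x => PySem.List.insertBy pvBLt x acc) acc).Pairwise pvLexLe := by
  induction l with
  | nil => intro acc h; exact h
  | cons x t ih => intro acc h; exact ih _ (insertBy_pairwise x acc h)

lemma sorted2_eq_foldl (xs : List (Int × Int)) :
    PySem.List.sorted2 xs (·.1) (·.2)
      = xs.foldl (fun acc x => PySem.List.insertBy pvBLt x acc) [] := rfl

lemma sorted2_pairwise (xs : List (Int × Int)) :
    (PySem.List.sorted2 xs (·.1) (·.2)).Pairwise pvLexLe := by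
  rw [sorted2_eq_foldl]
  exact foldl_insertBy_pairwise xs [] (List.Pairwise.nil)

-- the scan counts distinct elements of a sorted list
lemma scan_aux (l : List (Int × Int)) :
    ∀ (a : Int) (p : Int × Int), l.Pairwise pvLexLe → (∀ x ∈ l, pvLexLe p x) →
    (l.foldl pvStepB (a, some p)).1 = a + ((l.toFinset).erase p).card := by
  induction l with
  | nil => intro a p _ _; simp
  | cons k t ih =>
      intro a p hpw hple
      rw [List.pairwise_cons] at hpw
      by_cases hkp : k = p
      · have hstep : pvStepB (a, some p) k = (a, some p) := by
          simp [pvStepB, hkp]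
        have hle' : ∀ x ∈ t, pvLexLe p x := fun x hx => hkp ▸ hpw.1 x hx
        rw [List.foldl_cons, hstep, ih a p hpw.2 hle', hkp]
        have : (insert p t.toFinset).erase p = t.toFinset.erase p :=
          Finset.erase_insert_eq_erase _ _
        simp only [List.toFinset_cons, this]
      · have hstep : pvStepB (a, some p) k = (a + 1, some k) := by
          simp [pvStepB, hkp]
        rw [List.foldl_cons, hstep, ih (a + 1) k hpw.2 hpw.1]
        have hpk : pvLexLe p k := hple k (List.mem_cons_self)
        have hpt : p ∉ t := fun hmem =>
          pvLexLe_ne_of_ne hpk (fun h => hkp h.symm) (hpw.1 p hmem) rfl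
        have h1 : (insert k t.toFinset).erase p = insert k t.toFinset := by
          apply Finset.erase_eq_of_notMem
          simp only [Finset.mem_insert, List.mem_toFinset]
          rintro (h | h)
          · exact hkp h.symm
          · exact hpt h
        have h2 : (insert k t.toFinset).card = (t.toFinset.erase k).card + 1 := by
          have he : insert k t.toFinset = insert k (t.toFinset.erase k) := by
            ext z
            simp only [Finset.mem_insert, Finset.mem_erase]
            constructor
            · rintro (h | h)
              · exact Or.inl h
              · by_cases hzk : z = k
                · exact Or.inl hzk
                · exact Or.inr ⟨hzk, h⟩
            · rintro (h | h)
              · exact Or.inl h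
              · exact Or.inr h.2
          rw [he, Finset.card_insert_of_notMem (Finset.notMem_erase _ _)]
        simp only [List.toFinset_cons, h1, h2]
        omega

lemma scan_none (l : List (Int × Int)) (h : l.Pairwise pvLexLe) :
    (l.foldl pvStepB (0, none)).1 = l.toFinset.card := by
  cases l with
  | nil => simp
  | cons k t =>
      rw [List.pairwise_cons] at h
      have hstep : pvStepB (0, none) k = (1, some k) := by simp [pvStepB]
      rw [List.foldl_cons, hstep, scan_aux t 1 k h.2 h.1]
      have h2 : (insert k t.toFinset).card = (t.toFinset.erase k).card + 1 := by
        have he : insert k t.toFinset = insert k (t.toFinset.erase k) := by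
          ext z
          simp only [Finset.mem_insert, Finset.mem_erase]
          constructor
          · rintro (h | h)
            · exact Or.inl h
            · by_cases hzk : z = k
              · exact Or.inl hzk
              · exact Or.inr ⟨hzk, h⟩
          · rintro (h | h)
            · exact Or.inl h
            · exact Or.inr h.2
        rw [he, Finset.card_insert_of_notMem (Finset.notMem_erase _ _)]
      simp only [List.toFinset_cons, h2]
      omega

-- B's unsorted key list has pvK as its set of elements
lemma keysB_toFinset (edges : List (Int × Int)) :
    ((edges.filter (fun e => !(e.1 == e.2))).map
      (fun e => if e.1 ≤ e.2 then e else (e.2, e.1))).toFinset = pvK edges := by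
  unfold pvK
  have hf : edges.filter (fun e => !(e.1 == e.2)) = edges.filter (fun e => e.1 ≠ e.2) := by
    apply List.filter_congr
    intro e _
    simp [beq_eq_decide]
  rw [hf]
  congr 1
  apply List.map_congr_left
  intro e he
  have hne : e.1 ≠ e.2 := by
    have := (List.mem_filter.mp he).2
    simpa using this
  by_cases hle : e.1 ≤ e.2
  · rw [if_pos hle]
    have h1 : min e.1 e.2 = e.1 := min_eq_left hle
    have h2 : max e.1 e.2 = e.2 := max_eq_right hle
    rw [h1, h2]
  · rw [if_neg hle]
    have h1 : min e.1 e.2 = e.2 := min_eq_right (le_of_not_ge hle)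
    have h2 : max e.1 e.2 = e.1 := max_eq_left (le_of_not_ge hle)
    rw [h1, h2]

-- B in closed form
lemma alt_closed (edges : List (Int × Int)) :
    find_remove_edges_alt edges = (edges.length : Int) - (pvK edges).card := by
  unfold find_remove_edges_alt
  simp only []
  rw [scan_none _ (sorted2_pairwise _)]
  have hperm := PySem.List.sorted2_perm
    ((edges.filter (fun e => !(e.1 == e.2))).map (fun e => if e.1 ≤ e.2 then e else (e.2, e.1)))
    (·.1) (·.2) false
  have heq : (PySem.List.sorted2
      ((edges.filter (fun e => !(e.1 == e.2))).map (fun e => if e.1 ≤ e.2 then e else (e.2, e.1)))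
      (·.1) (·.2)).toFinset
      = ((edges.filter (fun e => !(e.1 == e.2))).map
          (fun e => if e.1 ≤ e.2 then e else (e.2, e.1))).toFinset := by
    ext z
    simp only [List.mem_toFinset]
    exact ⟨fun h => hperm.subset h, fun h => hperm.symm.subset h⟩
  rw [heq, keysB_toFinset]

-- ========== A side ==========

-- a key-replacing map over items with a fresh key is the identity
lemma map_replace_of_not_mem (l : List ((Int × Int) × Int)) (k : Int × Int) (w : Int)
    (h : k ∉ l.map (·.1)) :
    l.map (fun p => if p.1 == k then (k, w) else p) = l := by
  induction l with
  | nil => rfl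
  | cons p t ih =>
      simp only [List.map_cons, List.mem_cons, not_or] at h ⊢
      rw [if_neg (by simp only [beq_iff_eq]; exact fun hh => h.1 hh.symm), ih h.2]

-- sum of values after replacing the unique entry at key k by (k, w+1)
lemma sum_replace (l : List ((Int × Int) × Int)) (k : Int × Int) (w : Int)
    (hn : (l.map (·.1)).Nodup) (hm : (k, w) ∈ l) :
    ((l.map (fun p => if p.1 == k then (k, w + 1) else p)).map (·.2)).sum
      = (l.map (·.2)).sum + 1 := by
  induction l with
  | nil => cases hm
  | cons p t ih =>
      simp only [List.map_cons, List.nodup_cons] at hn ⊢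
      by_cases hpk : p.1 = k
      · have hpt : p = (k, w) := by
          cases hm with
          | head => rfl
          | tail _ hmem =>
              exact absurd (hpk ▸ List.mem_map_of_mem hmem :
                (p.1 ∈ t.map (·.1))) (by simpa [hpk] using hn.1)
        rw [if_pos (by simp [hpk]),
            map_replace_of_not_mem t k (w + 1) (by simpa [← hpk] using hn.1)]
        simp [hpt]
        ring
      · have hm' : (k, w) ∈ t := by
          cases hm with
          | head => exact absurd rfl hpk
          | tail _ hmem => exact hmem
        rw [if_neg (by simp [hpk])]
        simp only [List.sum_cons, ih hn.2 hm']
        ring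

-- one A-step: keys as a finite set, total of loops + counts, nodup keys
lemma stepA_inv (freq : PySem.Dict (Int × Int) Int) (loops : Int) (e : Int × Int)
    (hnd : freq.keys.Nodup) :
    (pvStepA (freq, loops) e).1.keys.toFinset
        = (if e.1 = e.2 then freq.keys.toFinset
           else insert (min e.1 e.2, max e.1 e.2) freq.keys.toFinset) ∧
    (pvStepA (freq, loops) e).2 + (pvStepA (freq, loops) e).1.values.sum
        = loops + freq.values.sum + 1 ∧
    (pvStepA (freq, loops) e).1.keys.Nodup := by
  obtain ⟨u, v⟩ := e
  by_cases huv : u = v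
  · simp only [pvStepA, huv]
    simp
    exact ⟨by omega, hnd⟩
  · have hmm : (if u > v then (v, u) else (u, v)) = (min u v, max u v) := by
      by_cases h : u > v <;> simp [h] <;> omega
    simp only [pvStepA, if_neg huv, hmm]
    set k : Int × Int := (min u v, max u v) with hkdef
    by_cases hc : freq.contains k
    · -- key already present: keys unchanged, value at k bumped
      obtain ⟨w, hw, hgd⟩ : ∃ w, (k, w) ∈ freq.items ∧ freq.getD k 0 = w := by
        rw [PySem.Dict.contains_eq_isSome_get?] at hc
        obtain ⟨w, hw⟩ := Option.isSome_iff_exists.mp hc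
        exact ⟨w, PySem.Dict.mem_items_of_get?_eq_some _ hw,
          PySem.Dict.getD_of_get?_eq_some _ _ hw⟩
      have hmemk : k ∈ freq.keys.toFinset := by
        rw [List.mem_toFinset, ← PySem.Dict.contains_iff_mem_keys]; exact hc
      simp only [if_neg (by simp [hc] : ¬ ¬ freq.contains k = true), hgd]
      refine ⟨?_, ?_, ?_⟩
      · rw [PySem.Dict.keys_insert_of_contains _ _ hc, Finset.insert_eq_self.mpr hmemk]
      · show loops + ((freq.insert k (w + 1)).items.map (·.2)).sum = loops + freq.values.sum + 1
        rw [PySem.Dict.items_insert_of_contains _ _ hc,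
          sum_replace freq.items k w hnd hw]
        show loops + (freq.values.sum + 1) = loops + freq.values.sum + 1
        omega
      · rw [PySem.Dict.keys_insert_of_contains _ _ hc]; exact hnd
    · -- fresh key: appended to keys, value 1
      have hnm : k ∉ freq.items.map (·.1) := by
        rw [show freq.items.map (·.1) = freq.keys from rfl,
          ← PySem.Dict.contains_iff_mem_keys]
        simp [hc]
      have hc' : (freq.insert k 0).contains k := PySem.Dict.contains_insert_self _ _ _
      have hitems : ((freq.insert k 0).insert k ((freq.insert k 0).getD k 0 + 1)).items
          = freq.items ++ [(k, 1)] := by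
        rw [PySem.Dict.getD_insert_self, PySem.Dict.items_insert_of_contains _ _ hc',
          PySem.Dict.items_insert_of_not_contains _ _ (by simp [hc])]
        rw [List.map_append, map_replace_of_not_mem freq.items k (0 + 1) hnm]
        simp
      simp only [if_pos (by simp [hc] : ¬ freq.contains k = true)]
      refine ⟨?_, ?_, ?_⟩
      · show (((freq.insert k 0).insert k ((freq.insert k 0).getD k 0 + 1)).items.map (·.1)).toFinset = _
        rw [hitems]
        simp only [List.map_append, List.map_cons, List.map_nil, List.toFinset_append]
        show freq.keys.toFinset ∪ [k].toFinset = insert k freq.keys.toFinset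
        simp [Finset.union_comm]
      · show loops + ((((freq.insert k 0).insert k ((freq.insert k 0).getD k 0 + 1)).items.map (·.2)).sum) = loops + freq.values.sum + 1
        rw [hitems]
        simp only [List.map_append, List.sum_append, List.map_cons, List.map_nil,
          List.sum_cons, List.sum_nil]
        show loops + (freq.values.sum + (1 + 0)) = loops + freq.values.sum + 1
        omega
      · show (((freq.insert k 0).insert k ((freq.insert k 0).getD k 0 + 1)).items.map (·.1)).Nodup
        rw [hitems]
        simp only [List.map_append, List.map_cons, List.map_nil]
        rw [List.nodup_append]
        refine ⟨hnd, List.nodup_singleton _, ?_⟩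
        intro x hx y hy
        rw [List.mem_singleton] at hy
        subst hy
        exact fun hxy => hnm (hxy ▸ hx)

-- pvK of a cons
lemma pvK_cons (e : Int × Int) (t : List (Int × Int)) :
    pvK (e :: t) = if e.1 = e.2 then pvK t else insert (min e.1 e.2, max e.1 e.2) (pvK t) := by
  unfold pvK
  by_cases h : e.1 = e.2
  · rw [if_pos h, List.filter_cons_of_neg (by simp [h])]
  · rw [if_neg h, List.filter_cons_of_pos (by simp [h])]
    simp

-- the whole A loop
lemma foldA (edges : List (Int × Int)) :
    ∀ (freq : PySem.Dict (Int × Int) Int) (loops : Int), freq.keys.Nodup →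
    (edges.foldl pvStepA (freq, loops)).1.keys.toFinset = freq.keys.toFinset ∪ pvK edges ∧
    (edges.foldl pvStepA (freq, loops)).2 + (edges.foldl pvStepA (freq, loops)).1.values.sum
        = loops + freq.values.sum + edges.length ∧
    (edges.foldl pvStepA (freq, loops)).1.keys.Nodup := by
  induction edges with
  | nil =>
      intro freq loops hnd
      refine ⟨?_, by simp, hnd⟩
      simp [pvK]
  | cons e t ih =>
      intro freq loops hnd
      obtain ⟨h1, h2, h3⟩ := stepA_inv freq loops e hnd
      obtain ⟨g1, g2, g3⟩ := ih (pvStepA (freq, loops) e).1 (pvStepA (freq, loops) e).2 h3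
      rw [List.foldl_cons]
      refine ⟨?_, ?_, g3⟩
      · rw [show t.foldl pvStepA (pvStepA (freq, loops) e)
              = t.foldl pvStepA ((pvStepA (freq, loops) e).1, (pvStepA (freq, loops) e).2) by rfl] at g1 ⊢
        rw [g1, h1, pvK_cons]
        by_cases h : e.1 = e.2
        · rw [if_pos h, if_pos h]
        · rw [if_neg h, if_neg h, Finset.insert_union, Finset.union_insert]
      · rw [show t.foldl pvStepA (pvStepA (freq, loops) e)
              = t.foldl pvStepA ((pvStepA (freq, loops) e).1, (pvStepA (freq, loops) e).2) by rfl] at g2 ⊢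
        rw [g2, h2]
        simp
        omega

-- A's second loop in closed form
lemma foldl_sub_one (vals : List Int) : ∀ (init : Int),
    vals.foldl (fun acc c => acc + (c - 1)) init = init + vals.sum - vals.length := by
  induction vals with
  | nil => intro init; simp
  | cons c t ih => intro init; simp [List.foldl_cons, ih]; ring

-- A in closed form
lemma a_closed (edges : List (Int × Int)) :
    find_remove_edges edges = (edges.length : Int) - (pvK edges).card := by
  unfold find_remove_edges
  simp only []
  obtain ⟨h1, h2, h3⟩ := foldA edges PySem.Dict.empty 0
    (by simp [PySem.Dict.keys, PySem.Dict.empty])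
  rw [foldl_sub_one]
  have hck : (edges.foldl pvStepA (PySem.Dict.empty, 0)).1.keys.toFinset.card
      = (edges.foldl pvStepA (PySem.Dict.empty, 0)).1.keys.length :=
    List.toFinset_card_of_nodup h3
  have hke : (PySem.Dict.empty : PySem.Dict (Int × Int) Int).keys.toFinset = ∅ := by
    simp [PySem.Dict.keys, PySem.Dict.empty]
  rw [hke, Finset.empty_union] at h1
  have hlen : (edges.foldl pvStepA (PySem.Dict.empty, 0)).1.values.length
      = (edges.foldl pvStepA (PySem.Dict.empty, 0)).1.keys.length := by
    simp [PySem.Dict.values, PySem.Dict.keys]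
  have hsum : (edges.foldl pvStepA (PySem.Dict.empty, 0)).2
      + (edges.foldl pvStepA (PySem.Dict.empty, 0)).1.values.sum = (edges.length : Int) := by
    rw [h2]; simp [PySem.Dict.values, PySem.Dict.empty]
  rw [← h1, hck] at *
  omega

-- ===== VERDICT (by name: the statement is the Claim_ definition above) =====
theorem find_remove_edges_spec : Claim_equal_find_remove_edges := by
  intro edges _
  unfold Spec_find_remove_edges
  rw [a_closed, alt_closed]
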